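-- pv_equiv track=rewrite | github.com/Kabilan21052004/Ap_Assignment | 2.py | minIndexFirstString
-- ===== SOURCE A (Python) =====
-- def minIndexFirstString(str1, str2):
--     max_index = -1
--     i = 0
--     for char in str1:
--         for j in range(len(str2)):
--             if char == str2[j]:
--                 max_index = i
--                 break
--         i += 1
--     return max_index
-- ===== SOURCE B (Python) =====
-- def minIndexFirstString(str1, str2):
--     chars = set(str2)
--     for i in range(len(str1) - 1, -1, -1):
--         if str1[i] in chars:
--             return i
--     return -1
-- ===== Notes on version B (the rewrite author's own statement) =====
-- stated objective: alternative
-- what changed: B scans str1's indices backward and returns the first index whose character is in a prebuilt set of str2's characters (early exit, no accumulator), instead of A's full forward scan with an inner linear search over str2 maintaining a running max_index.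
import Mathlib
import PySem

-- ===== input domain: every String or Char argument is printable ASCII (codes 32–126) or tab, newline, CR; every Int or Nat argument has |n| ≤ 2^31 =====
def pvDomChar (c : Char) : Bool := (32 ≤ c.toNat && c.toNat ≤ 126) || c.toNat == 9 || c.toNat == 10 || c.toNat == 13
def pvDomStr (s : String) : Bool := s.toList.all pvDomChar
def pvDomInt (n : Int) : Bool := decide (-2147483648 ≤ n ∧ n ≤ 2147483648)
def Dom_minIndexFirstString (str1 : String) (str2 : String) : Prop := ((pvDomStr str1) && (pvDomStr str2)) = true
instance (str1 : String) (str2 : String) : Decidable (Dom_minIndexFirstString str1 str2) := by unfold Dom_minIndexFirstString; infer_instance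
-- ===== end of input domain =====

-- B replaces A's forward scan with inner linear search and running max_index by a backward
-- index scan with a prebuilt character set and early return (alternative decomposition).


-- ===== PORT A =====
-- inner loop: for j in range(len(str2)): if char == str2[j]: … break
def pvInnerFound (c : Char) : List Char → Bool
  | [] => false
  | d :: ds => if c == d then true else pvInnerFound c ds

-- outer loop: state (max_index, i)
def pvOuterA (ds : List Char) : List Char → Int → Int → Int
  | [], m, _ => m
  | c :: cs, m, i => pvOuterA ds cs (if pvInnerFound c ds then i else m) (i + 1)

def minIndexFirstString (str1 : String) (str2 : String) : Int :=
  pvOuterA str2.toList str1.toList (-1) 0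

-- ===== PORT B =====
-- for i in range(len(str1)-1, -1, -1): if str1[i] in chars: return i
def pvBackScan (s : PySem.Set Char) : List (Int × Char) → Int
  | [] => -1
  | (i, c) :: rest => if PySem.Set.contains s c then i else pvBackScan s rest

def minIndexFirstString_alt (str1 : String) (str2 : String) : Int :=
  pvBackScan (PySem.Set.ofList str2.toList) ((PySem.List.enumerate str1.toList 0).reverse)

-- ===== PRECONDITION & SPEC =====
def Spec_minIndexFirstString (str1 : String) (str2 : String) (out : Int) : Prop := out = minIndexFirstString_alt str1 str2
instance (str1 : String) (str2 : String) (out : Int) : Decidable (Spec_minIndexFirstString str1 str2 out) := by unfold Spec_minIndexFirstString; infer_instance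

-- ===== CLAIM (what is proved, stated in full; the proofs are below) =====
def Claim_equal_minIndexFirstString : Prop := ∀ (str1 : String) (str2 : String), Dom_minIndexFirstString str1 str2 → Spec_minIndexFirstString str1 str2 (minIndexFirstString str1 str2)

-- ===== LEMMAS AND PROOFS =====

theorem pvInnerFound_eq (c : Char) (ds : List Char) :
    pvInnerFound c ds = decide (c ∈ ds) := by
  induction ds with
  | nil => simp [pvInnerFound]
  | cons d ds ih =>
      by_cases h : c = d
      · simp [pvInnerFound, h]
      · simp [pvInnerFound, h, ih]

theorem pvSetContains_ofList (c : Char) (ds : List Char) :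
    PySem.Set.contains (PySem.Set.ofList ds) c = decide (c ∈ ds) := by
  simp [PySem.Set.contains, PySem.Set.mem_ofList]

theorem pvBackScan_eq_find (s : PySem.Set Char) (l : List (Int × Char)) :
    pvBackScan s l =
      match l.find? (fun p => PySem.Set.contains s p.2) with
      | some p => p.1
      | none => -1 := by
  induction l with
  | nil => rfl
  | cons p rest ih =>
      obtain ⟨i, c⟩ := p
      rw [pvBackScan, List.find?]
      cases h : PySem.Set.contains s c with
      | true => simp
      | false => simp [ih]

theorem pvOuterA_eq_revFind (ds cs : List Char) (m : Int) (i0 : Int) :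
    pvOuterA ds cs m i0 =
      match (PySem.List.enumerate cs i0).reverse.find? (fun p => decide (p.2 ∈ ds)) with
      | some p => p.1
      | none => m := by
  induction cs generalizing m i0 with
  | nil => simp [pvOuterA, PySem.List.enumerate_nil]
  | cons c cs ih =>
      rw [PySem.List.enumerate_cons]
      simp only [List.reverse_cons, List.find?_append]
      rw [pvOuterA, ih]
      cases hfind : (PySem.List.enumerate cs (i0 + 1)).reverse.find? (fun p => decide (p.2 ∈ ds)) with
      | some p => simp
      | none =>
          by_cases h : c ∈ ds <;>
            simp [List.find?, h, pvInnerFound_eq]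

-- ===== VERDICT (by name: the statement is the Claim_ definition above) =====
theorem minIndexFirstString_spec : Claim_equal_minIndexFirstString := by
  intro str1 str2 _
  unfold Spec_minIndexFirstString minIndexFirstString minIndexFirstString_alt
  rw [pvOuterA_eq_revFind, pvBackScan_eq_find]
  have hpred : (fun p : Int × Char => PySem.Set.contains (PySem.Set.ofList str2.toList) p.2)
      = (fun p : Int × Char => decide (p.2 ∈ str2.toList)) := by
    funext p
    rw [pvSetContains_ofList]
  rw [hpred]
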